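-- pv_equiv track=rewrite | github.com/matrixswarm/phoenix | matrix_gui/modules/vault/vault_stores/deployment_store.py | _validate_agent_graph
-- ===== SOURCE A (Python) =====
-- def _validate_agent_graph(dep_meta):
--     agents = dep_meta.get("agents", [])
--     if not agents:
--         return False
--
--     # Must have exactly one root node (matrix or primary)
--     roots = [a for a in agents if not a.get("parent")]
--     if len(roots) != 1:
--         return False
--
--     # Prevent cycles
--     visited = set()
--
--     def walk(node_name):
--         if node_name in visited:
--             return False  # cycle detected
--         visited.add(node_name)
--
--         children = [a["name"] for a in agents if a.get("parent") == node_name]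
--         return all(walk(child) for child in children)
--
--     root = roots[0]["name"]
--     return walk(root)
-- ===== SOURCE B (Python) =====
-- def _validate_agent_graph(dep_meta):
--     agents = dep_meta.get("agents", [])
--     roots = [a for a in agents if not a.get("parent")]
--     if not agents or len(roots) != 1:
--         return False
--
--     # one pass: parent value -> list of child names (keys may be None or "")
--     kids = {}
--     for a in agents:
--         kids.setdefault(a.get("parent"), []).append(a["name"])
--
--     # iterative traversal with an explicit worklist (no recursion, no all()):
--     # pop a node; a repeat means a second path to it (cycle / duplicate) -> invalid.
--     seen = set()
--     stack = [roots[0]["name"]]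
--     while stack:
--         node = stack.pop()
--         if node in seen:
--             return False
--         seen.add(node)
--         stack.extend(reversed(kids.get(node, [])))
--     return True
-- ===== Notes on version B (the rewrite author's own statement) =====
-- stated objective: alternative
-- what changed: B replaces A's recursive short-circuit walk (which rescans the whole agent list at every node and threads a shared visited set through nested all() calls) by a flat iterative worklist loop over a parent->children index built in one pass: one while loop popping an explicit stack, no recursion and no per-node rescan (measured ~1.3x at the largest size, below the 1.5x bar, so not claimed as faster).
-- outside the precondition, e.g. on _validate_agent_graph({'agents': [{'name': 'r'}, {'parent': 'x'}]}): A returns True, B raises KeyError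
import Mathlib
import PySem

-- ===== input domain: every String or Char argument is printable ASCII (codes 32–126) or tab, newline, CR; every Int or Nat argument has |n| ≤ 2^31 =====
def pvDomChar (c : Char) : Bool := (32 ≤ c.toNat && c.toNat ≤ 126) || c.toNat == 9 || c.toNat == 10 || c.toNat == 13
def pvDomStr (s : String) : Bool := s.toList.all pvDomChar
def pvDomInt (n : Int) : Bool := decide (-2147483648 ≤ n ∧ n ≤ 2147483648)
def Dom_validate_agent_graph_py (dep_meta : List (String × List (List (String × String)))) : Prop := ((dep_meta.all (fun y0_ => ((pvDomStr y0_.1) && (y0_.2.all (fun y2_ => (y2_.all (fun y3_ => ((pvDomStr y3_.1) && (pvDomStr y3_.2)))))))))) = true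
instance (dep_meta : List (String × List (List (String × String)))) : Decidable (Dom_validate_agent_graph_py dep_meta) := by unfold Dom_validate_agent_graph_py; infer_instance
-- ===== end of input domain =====

-- B replaces A's recursive short-circuit DFS with per-node rescans by an iterative
-- explicit-worklist loop over a parent→children index built in one pass.
-- Return-value equivalence only; neither program mutates its argument.

-- ===== PORT A =====
-- shared accessors (both Pythons contain these very expressions)
def pvAgentsOf (dep_meta : List (String × List (List (String × String)))) : List (List (String × String)) :=
  (PySem.Dict.ofList dep_meta).getD "agents" []

-- Python's `not a.get("parent")`: missing key or empty string
def pvNoParent (a : List (String × String)) : Bool :=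
  match (PySem.Dict.ofList a).get? "parent" with
  | none => true
  | some s => s == ""

-- a["name"] is ported as getD "name" ""; Pre_ guarantees the key is present wherever it is read.
def pvNameOf (a : List (String × String)) : String :=
  (PySem.Dict.ofList a).getD "name" ""

-- A's per-node comprehension: [a["name"] for a in agents if a.get("parent") == node]
def pvKidsOf (agents : List (List (String × String))) (node : String) : List String :=
  (agents.filter (fun a => (PySem.Dict.ofList a).get? "parent" == some node)).map pvNameOf

-- fuel = agents.length + 1 is a termination guard only: each nested call first adds a fresh
-- name (drawn from the agents) to `visited`, so the Python recursion never nests deeper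
-- (the lemmas below prove this fuel is never exhausted).
def pvWalkA (agents : List (List (String × String))) :
    Nat → String → PySem.Set String → Bool × PySem.Set String
  | 0, _, vis => (false, vis)
  | fuel+1, node, vis =>
    if PySem.Set.contains vis node then (false, vis)
    else
      (pvKidsOf agents node).foldl
        (fun acc c => if acc.1 then pvWalkA agents fuel c acc.2 else acc)
        (true, PySem.Set.add vis node)

def validate_agent_graph_py (dep_meta : List (String × List (List (String × String)))) : Bool :=
  let agents := pvAgentsOf dep_meta
  if agents = [] then false
  else
    let roots := agents.filter pvNoParent
    if roots.length ≠ 1 then false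
    else
      (pvWalkA agents (agents.length + 1) (pvNameOf (roots.headD [])) PySem.Set.empty).1

-- ===== PORT B =====
-- kids.setdefault(a.get("parent"), []).append(a["name"]) over all agents (keys may be None)
def pvKidsB (agents : List (List (String × String))) :
    PySem.Dict (Option String) (List String) :=
  agents.foldl (fun d a =>
      d.modify ((PySem.Dict.ofList a).get? "parent") []
        (· ++ [pvNameOf a]))
    PySem.Dict.empty

-- B's while-loop: the Lean list is the Python stack reversed (head = top of stack), so
-- `stack.pop()` pops the head and `stack.extend(reversed(kids.get(node, [])))` prepends the
-- children in order.  fuel = agents.length + 2 is a termination guard only: every iteration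
-- either returns or adds a fresh name to `seen` (the lemmas below prove it is never exhausted).
def pvStackB (kids : PySem.Dict (Option String) (List String)) :
    Nat → List String → PySem.Set String → Bool
  | 0, _, _ => false
  | _+1, [], _ => true
  | fuel+1, node :: rest, seen =>
    if PySem.Set.contains seen node then false
    else pvStackB kids fuel (kids.getD (some node) [] ++ rest) (PySem.Set.add seen node)

def validate_agent_graph_py_alt (dep_meta : List (String × List (List (String × String)))) : Bool :=
  let agents := pvAgentsOf dep_meta
  let roots := agents.filter pvNoParent
  if agents = [] ∨ roots.length ≠ 1 then false
  else
    pvStackB (pvKidsB agents) (agents.length + 2)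
      [pvNameOf (roots.headD [])] PySem.Set.empty

-- ===== PRECONDITION & SPEC =====
-- Pre_ excludes the inputs with exactly one root where some agent dict lacks a "name" key:
-- there A raises KeyError on every agent it walks (and B on every agent), but A returns
-- when the name-less agent happens to be unreachable from the root, while B always reads it.
def Pre_validate_agent_graph_py (dep_meta : List (String × List (List (String × String)))) : Prop :=
  pvAgentsOf dep_meta = [] ∨
  ((pvAgentsOf dep_meta).filter pvNoParent).length ≠ 1 ∨
  ∀ a ∈ pvAgentsOf dep_meta, (PySem.Dict.ofList a).contains "name" = true
instance (dep_meta : List (String × List (List (String × String)))) : Decidable (Pre_validate_agent_graph_py dep_meta) := by unfold Pre_validate_agent_graph_py; infer_instance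

def pvWitness_validate_agent_graph_py : (List (String × List (List (String × String)))) :=
  [("agents", [[("name", "r")], [("name", "c"), ("parent", "r")]])]

def Spec_validate_agent_graph_py (dep_meta : List (String × List (List (String × String)))) (out : Bool) : Prop := out = validate_agent_graph_py_alt dep_meta
instance (dep_meta : List (String × List (List (String × String)))) (out : Bool) : Decidable (Spec_validate_agent_graph_py dep_meta out) := by unfold Spec_validate_agent_graph_py; infer_instance

-- ===== CLAIM (what is proved, stated in full; the proofs are below) =====
def Claim_equal_validate_agent_graph_py : Prop := ∀ (dep_meta : List (String × List (List (String × String)))), Dom_validate_agent_graph_py dep_meta → Pre_validate_agent_graph_py dep_meta → Spec_validate_agent_graph_py dep_meta (validate_agent_graph_py dep_meta)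

-- ===== LEMMAS AND PROOFS =====

-- A's sibling loop: all(walk(child) for child in children), with the shared visited set threaded
def pvWalkF (agents : List (List (String × String))) (fuel : Nat) (ns : List String)
    (st : Bool × PySem.Set String) : Bool × PySem.Set String :=
  ns.foldl (fun acc c => if acc.1 then pvWalkA agents fuel c acc.2 else acc) st

-- the distinct agent names; `pvMiss` counts those not yet visited (the fuel measure)
def pvNamesL (agents : List (List (String × String))) : List String :=
  PySem.List.dedup (agents.map pvNameOf)

def pvMiss (agents : List (List (String × String))) (vis : PySem.Set String) : Nat :=
  (pvNamesL agents).countP (fun x => !(PySem.Set.contains vis x))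

theorem pvWalkF_false (agents : List (List (String × String))) (fuel : Nat)
    (ns : List String) (v : PySem.Set String) :
    pvWalkF agents fuel ns (false, v) = (false, v) := by
  induction ns with
  | nil => rfl
  | cons c ns ih => simpa [pvWalkF, List.foldl] using ih

theorem pvWalkF_cons (agents : List (List (String × String))) (fuel : Nat)
    (n : String) (ns : List String) (v : PySem.Set String) :
    pvWalkF agents fuel (n :: ns) (true, v) =
      pvWalkF agents fuel ns (pvWalkA agents fuel n v) := rfl

theorem pvWalkA_succ (agents : List (List (String × String))) (fuel : Nat)
    (n : String) (vis : PySem.Set String) :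
    pvWalkA agents (fuel+1) n vis =
      if PySem.Set.contains vis n then (false, vis)
      else pvWalkF agents fuel (pvKidsOf agents n) (true, PySem.Set.add vis n) := rfl

theorem pvContains_iff (v : PySem.Set String) (x : String) :
    PySem.Set.contains v x = true ↔ x ∈ v := by
  simp [PySem.Set.contains]

theorem pvGrow_walk (agents : List (List (String × String))) :
    ∀ (fuel : Nat) (n : String) (vis : PySem.Set String) (x : String),
      x ∈ vis → x ∈ (pvWalkA agents fuel n vis).2 := by
  intro fuel
  induction fuel with
  | zero => intro n vis x hx; simpa [pvWalkA] using hx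
  | succ f ih =>
    have fold : ∀ (ns : List String) (st : Bool × PySem.Set String) (x : String),
        x ∈ st.2 → x ∈ (pvWalkF agents f ns st).2 := by
      intro ns
      induction ns with
      | nil => intro st x hx; exact hx
      | cons c ns ihn =>
        intro st x hx
        have hstep : x ∈ (if st.1 then pvWalkA agents f c st.2 else st).2 := by
          by_cases h : st.1 = true
          · simpa [h] using ih c st.2 x hx
          · simpa [h] using hx
        simpa [pvWalkF, List.foldl] using ihn _ x hstep
    intro n vis x hx
    rw [pvWalkA_succ]
    cases h : PySem.Set.contains vis n with
    | true => simp only [if_true]; exact hx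
    | false =>
      have hmem : x ∈ PySem.Set.add vis n := (PySem.Set.mem_add vis n x).mpr (Or.inl hx)
      simp only [Bool.false_eq_true, if_false]
      exact fold (pvKidsOf agents n) (true, PySem.Set.add vis n) x hmem

theorem pvGrow_fold (agents : List (List (String × String))) (fuel : Nat) :
    ∀ (ns : List String) (st : Bool × PySem.Set String) (x : String),
      x ∈ st.2 → x ∈ (pvWalkF agents fuel ns st).2 := by
  intro ns
  induction ns with
  | nil => intro st x hx; exact hx
  | cons c ns ihn =>
    intro st x hx
    have hstep : x ∈ (if st.1 then pvWalkA agents fuel c st.2 else st).2 := by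
      by_cases h : st.1 = true
      · simpa [h] using pvGrow_walk agents fuel c st.2 x hx
      · simpa [h] using hx
    simpa [pvWalkF, List.foldl] using ihn _ x hstep

theorem pvMiss_mono (agents : List (List (String × String))) (v w : PySem.Set String)
    (h : ∀ x, x ∈ v → x ∈ w) : pvMiss agents w ≤ pvMiss agents v := by
  refine List.countP_mono_left ?_
  intro x _ hx
  simp only [Bool.not_eq_eq_eq_not, Bool.not_true] at hx ⊢
  by_contra hv
  have hv' : PySem.Set.contains v x = true := by
    cases hcv : PySem.Set.contains v x with
    | false => exact absurd hcv hv
    | true => rfl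
  have : x ∈ w := h x ((pvContains_iff v x).mp hv')
  rw [(pvContains_iff w x).mpr this] at hx
  cases hx

theorem pvMiss_add_eq (agents : List (List (String × String))) (vis : PySem.Set String)
    (n : String) (hn : n ∈ pvNamesL agents) (hc : PySem.Set.contains vis n = false) :
    pvMiss agents (PySem.Set.add vis n) + 1 = pvMiss agents vis := by
  have hnd : (pvNamesL agents).Nodup := PySem.List.nodup_dedup _
  have hperm := List.perm_cons_erase hn
  unfold pvMiss
  rw [hperm.countP_eq (fun x => !(PySem.Set.contains (PySem.Set.add vis n) x)),
      hperm.countP_eq (fun x => !(PySem.Set.contains vis x))]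
  have hqn : PySem.Set.contains (PySem.Set.add vis n) n = true :=
    (pvContains_iff _ n).mpr ((PySem.Set.mem_add vis n n).mpr (Or.inr rfl))
  have hcong : ∀ x ∈ (pvNamesL agents).erase n,
      (!(PySem.Set.contains (PySem.Set.add vis n) x)) = (!(PySem.Set.contains vis x)) := by
    intro x hx
    have hxn : x ≠ n := ((List.Nodup.mem_erase_iff hnd).mp hx).1
    have : (PySem.Set.contains (PySem.Set.add vis n) x = true) ↔
        (PySem.Set.contains vis x = true) := by
      rw [pvContains_iff, pvContains_iff, PySem.Set.mem_add]
      exact ⟨fun h => h.resolve_right hxn, Or.inl⟩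
    cases hb : PySem.Set.contains vis x with
    | true => simp only [this.mpr hb]
    | false =>
      cases hb2 : PySem.Set.contains (PySem.Set.add vis n) x with
      | true =>
        rw [hb] at this
        exact absurd (this.mp hb2) (by simp)
      | false => rfl
  rw [List.countP_cons, List.countP_cons, hqn, hc,
      List.countP_congr (fun x hx => by rw [hcong x hx])]
  simp [Nat.add_comm]

theorem pvKids_sub (agents : List (List (String × String))) (n x : String)
    (hx : x ∈ pvKidsOf agents n) : x ∈ pvNamesL agents := by
  rw [pvNamesL, PySem.List.mem_dedup]
  obtain ⟨a, ha, rfl⟩ := List.mem_map.mp hx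
  exact List.mem_map.mpr ⟨a, (List.mem_filter.mp ha).1, rfl⟩

-- B's precomputed dict agrees pointwise with A's per-node comprehension
theorem pvKidsB_getD (agents : List (List (String × String))) (node : String) :
    (pvKidsB agents).getD (some node) [] = pvKidsOf agents node := by
  have h := PySem.Dict.getD_foldl_modify_append
      (l := agents.map (fun a => ((PySem.Dict.ofList a).get? "parent", pvNameOf a)))
      (d := (PySem.Dict.empty : PySem.Dict (Option String) (List String)))
      (c := some node)
  simp only [List.foldl_map] at h
  simp only [pvKidsB, h, PySem.Dict.getD_empty, List.nil_append, pvKidsOf,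
    List.filter_map, List.map_map, Function.comp_def]

theorem pvStack_stable (agents : List (List (String × String))) :
    ∀ (g : Nat) (stack : List String) (vis : PySem.Set String),
      (∀ x ∈ stack, x ∈ pvNamesL agents) → pvMiss agents vis < g →
      pvStackB (pvKidsB agents) g stack vis =
        pvStackB (pvKidsB agents) (pvMiss agents vis + 1) stack vis := by
  intro g
  induction g with
  | zero => intro stack vis _ h; omega
  | succ g ih =>
    intro stack vis hsub hlt
    cases stack with
    | nil => rfl
    | cons n rest =>
      cases hc : PySem.Set.contains vis n with
      | true => simp only [pvStackB, hc, if_true]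
      | false =>
        have hn : n ∈ pvNamesL agents := hsub n (List.mem_cons_self)
        have hme := pvMiss_add_eq agents vis n hn hc
        have hsub' : ∀ x ∈ (pvKidsB agents).getD (some n) [] ++ rest, x ∈ pvNamesL agents := by
          intro x hx
          rcases List.mem_append.mp hx with h | h
          · exact pvKids_sub agents n x (by rwa [pvKidsB_getD] at h)
          · exact hsub x (List.mem_cons_of_mem _ h)
        have hlt' : pvMiss agents (PySem.Set.add vis n) < g := by omega
        simp only [pvStackB, hc, Bool.false_eq_true, if_false]
        rw [ih _ _ hsub' hlt', ← hme]

theorem pvMain (agents : List (List (String × String))) :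
    ∀ (f : Nat) (ns rest : List String) (vis : PySem.Set String) (g : Nat),
      (∀ x ∈ ns, x ∈ pvNamesL agents) → (∀ x ∈ rest, x ∈ pvNamesL agents) →
      pvMiss agents vis < f → pvMiss agents vis < g →
      (((pvWalkF agents f ns (true, vis)).1 = true →
          ∀ g', pvMiss agents (pvWalkF agents f ns (true, vis)).2 < g' →
            pvStackB (pvKidsB agents) g (ns ++ rest) vis =
              pvStackB (pvKidsB agents) g' rest (pvWalkF agents f ns (true, vis)).2)
       ∧ ((pvWalkF agents f ns (true, vis)).1 = false →
            pvStackB (pvKidsB agents) g (ns ++ rest) vis = false)) := by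
  intro f
  induction f with
  | zero => intro ns rest vis g _ _ h _; omega
  | succ f ihf =>
    intro ns
    induction ns with
    | nil =>
      intro rest vis g _ hrest hf hg
      simp only [pvWalkF, List.foldl_nil, List.nil_append]
      refine ⟨fun _ g' hg' => ?_, (fun h => nomatch h)⟩
      rw [pvStack_stable agents g rest vis hrest hg,
          pvStack_stable agents g' rest vis hrest hg']
    | cons n ns' ihn =>
      intro rest vis g hns hrest hf hg
      have hn : n ∈ pvNamesL agents := hns n (List.mem_cons_self)
      have hns' : ∀ x ∈ ns', x ∈ pvNamesL agents := fun x hx => hns x (List.mem_cons_of_mem _ hx)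
      obtain ⟨g₀, rfl⟩ : ∃ g₀, g = g₀ + 1 := ⟨g - 1, by omega⟩
      rw [pvWalkF_cons]
      simp only [List.cons_append]
      cases hc : PySem.Set.contains vis n with
      | true =>
        have hw : pvWalkA agents (f+1) n vis = (false, vis) := by
          rw [pvWalkA_succ, hc]; rfl
        rw [hw, pvWalkF_false]
        refine ⟨(fun h => nomatch h), fun _ => ?_⟩
        show pvStackB (pvKidsB agents) (g₀+1) (n :: (ns' ++ rest)) vis = false
        simp only [pvStackB, hc, if_true]
      | false =>
        have hme := pvMiss_add_eq agents vis n hn hc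
        have hw : pvWalkA agents (f+1) n vis =
            pvWalkF agents f (pvKidsOf agents n) (true, PySem.Set.add vis n) := by
          rw [pvWalkA_succ, hc]; rfl
        have hstep : pvStackB (pvKidsB agents) (g₀+1) (n :: (ns' ++ rest)) vis =
            pvStackB (pvKidsB agents) g₀ (pvKidsOf agents n ++ (ns' ++ rest))
              (PySem.Set.add vis n) := by
          simp only [pvStackB, hc, Bool.false_eq_true, if_false]
          rw [pvKidsB_getD]
        have hkids : ∀ x ∈ pvKidsOf agents n, x ∈ pvNamesL agents :=
          fun x hx => pvKids_sub agents n x hx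
        have hrest' : ∀ x ∈ ns' ++ rest, x ∈ pvNamesL agents := by
          intro x hx
          rcases List.mem_append.mp hx with h | h
          · exact hns' x h
          · exact hrest x h
        have hf' : pvMiss agents (PySem.Set.add vis n) < f := by omega
        have hg' : pvMiss agents (PySem.Set.add vis n) < g₀ := by omega
        obtain ⟨P1, P2⟩ := ihf (pvKidsOf agents n) (ns' ++ rest) (PySem.Set.add vis n) g₀
          hkids hrest' hf' hg'
        set w := pvWalkF agents f (pvKidsOf agents n) (true, PySem.Set.add vis n) with hwdef
        cases hw1 : w.1 with
        | false =>
          have hwpair : w = (false, w.2) := by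
            cases hwp : w
            simp only [hwp] at hw1 ⊢
            simp [hw1]
          rw [hw, hwpair, pvWalkF_false]
          exact ⟨(fun h => nomatch h), fun _ => by rw [hstep]; exact P2 hw1⟩
        | true =>
          have hwpair : w = (true, w.2) := by
            cases hwp : w
            simp only [hwp] at hw1 ⊢
            simp [hw1]
          have hmw : pvMiss agents w.2 ≤ pvMiss agents (PySem.Set.add vis n) :=
            pvMiss_mono agents _ _ (fun x hx => pvGrow_fold agents f _ _ x hx)
          have hchain : pvStackB (pvKidsB agents) (g₀+1) (n :: (ns' ++ rest)) vis =
              pvStackB (pvKidsB agents) (pvMiss agents w.2 + 1) (ns' ++ rest) w.2 := by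
            rw [hstep]
            exact P1 hw1 (pvMiss agents w.2 + 1) (by omega)
          obtain ⟨Q1, Q2⟩ := ihn rest w.2 (pvMiss agents w.2 + 1) hns' hrest
            (by omega) (by omega)
          rw [hw, hwpair]
          constructor
          · intro h1 g' hg''
            rw [hchain]
            exact Q1 h1 g' hg''
          · intro h1
            rw [hchain]
            exact Q2 h1

theorem pvMiss_empty_le (agents : List (List (String × String))) :
    pvMiss agents PySem.Set.empty ≤ agents.length := by
  calc pvMiss agents PySem.Set.empty ≤ (pvNamesL agents).length := List.countP_le_length
  _ ≤ (agents.map pvNameOf).length := PySem.Set.length_ofList_le _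
  _ = agents.length := by simp

theorem pvMain_apply (agents : List (List (String × String))) (root : String)
    (hroot : root ∈ pvNamesL agents) :
    (pvWalkA agents (agents.length + 1) root PySem.Set.empty).1 =
      pvStackB (pvKidsB agents) (agents.length + 2) [root] PySem.Set.empty := by
  have hmiss := pvMiss_empty_le agents
  obtain ⟨P1, P2⟩ := pvMain agents (agents.length + 1) [root] [] PySem.Set.empty
    (agents.length + 2)
    (by intro x hx; rcases List.mem_singleton.mp hx with rfl; exact hroot)
    (by intro x hx; cases hx)
    (by omega) (by omega)
  have hW : pvWalkF agents (agents.length + 1) [root] (true, PySem.Set.empty) =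
      pvWalkA agents (agents.length + 1) root PySem.Set.empty := rfl
  rw [hW] at P1 P2
  cases hA : (pvWalkA agents (agents.length + 1) root PySem.Set.empty).1 with
  | true =>
    have := P1 hA (pvMiss agents (pvWalkA agents (agents.length + 1) root PySem.Set.empty).2 + 1)
      (by omega)
    rw [List.append_nil] at this
    rw [this]
    rfl
  | false =>
    have := P2 hA
    rw [List.append_nil] at this
    rw [this]

theorem validate_agent_graph_py_spec : Claim_equal_validate_agent_graph_py := by
  intro dep_meta _ _
  unfold Spec_validate_agent_graph_py validate_agent_graph_py validate_agent_graph_py_alt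
  by_cases h1 : pvAgentsOf dep_meta = []
  · simp [h1]
  · by_cases h2 : ((pvAgentsOf dep_meta).filter pvNoParent).length = 1
    · have hroot : pvNameOf (((pvAgentsOf dep_meta).filter pvNoParent).headD []) ∈
          pvNamesL (pvAgentsOf dep_meta) := by
        obtain ⟨r, hr⟩ := List.length_eq_one_iff.mp h2
        have hrm : r ∈ (pvAgentsOf dep_meta).filter pvNoParent := by
          rw [hr]; exact List.mem_singleton.mpr rfl
        have hra : r ∈ pvAgentsOf dep_meta := (List.mem_filter.mp hrm).1
        rw [hr]
        simp only [List.headD_cons]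
        rw [pvNamesL, PySem.List.mem_dedup]
        exact List.mem_map.mpr ⟨r, hra, rfl⟩
      simp only [h1, h2, ne_eq, not_true_eq_false, or_false, if_false]
      exact pvMain_apply (pvAgentsOf dep_meta) _ hroot
    · simp [h1, h2]
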